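-- pv_equiv track=rewrite | github.com/Cleankz/transformationx2 | trans.py | step_to_transform
-- ===== SOURCE A (Python) =====
-- def step_to_transform(array):
--     B = []
--     flag = True
--     for i in range(len(array)-1):
--         for j in range(len(array)-1-i):
--             k = i + j
--             if k == j:
--                 max = array[0]
--             else:
--                 max = 0
--             for x in array[j:k]:
--                 if max <= x:
--                     max = x
--             B.append(max)
--     return B
-- ===== SOURCE B (Python) =====
-- def step_to_transform(array):
--     n = len(array)
--     if n < 2:
--         return []
--     B = [array[0]] * (n - 1)
--     row = [0] * (n - 1)
--     for w in range(1, n - 1):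
--         # row[j] becomes max(0, max(array[j:j+w])), extended by one element per pass
--         row = [max(row[j], array[j + w - 1]) for j in range(n - 1 - w)]
--         B += row
--     return B
-- ===== Notes on version B (the rewrite author's own statement) =====
-- stated objective: faster
-- what changed: Replaces the triple nested loop (recomputing each window's clamped maximum from scratch) with a row dynamic programme that extends each window's running maximum by one element per pass, and emits the constant first block directly.
import Mathlib
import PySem

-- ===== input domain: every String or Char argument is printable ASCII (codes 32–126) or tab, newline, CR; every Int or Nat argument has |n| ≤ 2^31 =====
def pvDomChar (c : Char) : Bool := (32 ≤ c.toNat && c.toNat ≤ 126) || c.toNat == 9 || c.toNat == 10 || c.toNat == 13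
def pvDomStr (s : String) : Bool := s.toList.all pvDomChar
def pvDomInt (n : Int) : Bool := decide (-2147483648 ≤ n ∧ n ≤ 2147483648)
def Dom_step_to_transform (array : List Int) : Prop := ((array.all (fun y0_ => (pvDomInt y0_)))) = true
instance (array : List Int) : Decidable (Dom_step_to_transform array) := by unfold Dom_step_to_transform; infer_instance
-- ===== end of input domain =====

-- B replaces A's O(n^3) triple loop by an O(n^2) row dynamic programme (each pass extends every window maximum by one element).

-- ===== PORT A =====
-- array[0] is only evaluated when the loops run, hence array ≠ []; the pyGetD default 0 is unreachable there.
def step_to_transform (array : List Int) : List Int :=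
  let n : Int := array.length
  (PySem.List.pyRange 0 (n-1) 1).foldl (fun B i =>
    (PySem.List.pyRange 0 (n-1-i) 1).foldl (fun B j =>
      let k := i + j
      let m0 : Int := if k == j then PySem.List.pyGetD array 0 0 else 0
      let m := (PySem.List.slice array (some j) (some k)).foldl
        (fun m x => if m ≤ x then x else m) m0
      B ++ [m]) B) []

-- ===== PORT B =====
def step_to_transform_alt (array : List Int) : List Int :=
  let n : Int := array.length
  if n < 2 then []
  else
    let B0 := List.replicate (n-1).toNat (PySem.List.pyGetD array 0 0)
    let row0 := List.replicate (n-1).toNat (0 : Int)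
    ((PySem.List.pyRange 1 (n-1) 1).foldl (fun (st : List Int × List Int) w =>
      let row' := (PySem.List.pyRange 0 (n-1-w) 1).map (fun j =>
        max (PySem.List.pyGetD st.2 j 0) (PySem.List.pyGetD array (j+w-1) 0))
      (st.1 ++ row', row')) (B0, row0)).1

-- ===== PRECONDITION & SPEC =====
def Spec_step_to_transform (array : List Int) (out : List Int) : Prop := out = step_to_transform_alt array
instance (array : List Int) (out : List Int) : Decidable (Spec_step_to_transform array out) := by unfold Spec_step_to_transform; infer_instance

-- ===== CLAIM (what is proved, stated in full; the proofs are below) =====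
def Claim_equal_step_to_transform : Prop := ∀ (array : List Int), Dom_step_to_transform array → Spec_step_to_transform array (step_to_transform array)

-- ===== LEMMAS AND PROOFS =====

def wmax (array : List Int) (w j : Nat) : Int := ((array.drop j).take w).foldl max 0

lemma wmax_succ (array : List Int) (w j : Nat) (h : j + w < array.length) :
    wmax array (w+1) j = max (wmax array w j) (array.getD (j+w) 0) := by
  unfold wmax
  have h1 : (array.drop j).take (w+1) = (array.drop j).take w ++ ((array.drop j)[w]?).toList :=
    List.take_add_one
  have h2 : (array.drop j)[w]? = some (array.getD (j+w) 0) := by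
    rw [List.getElem?_drop]
    rw [List.getElem?_eq_getElem (by omega), List.getD_eq_getElem _ _ (by omega)]
  rw [h1, h2]
  simp [List.foldl_append]

lemma aval_pos (array : List Int) (i j : Int) (hi : 1 ≤ i) (hj : 0 ≤ j) :
    (PySem.List.slice array (some j) (some (i + j))).foldl
        (fun m x => if m ≤ x then x else m) 0 = wmax array i.toNat j.toNat := by
  rw [PySem.List.slice_toNat _ hj (by omega)]
  rw [show (i+j).toNat - j.toNat = i.toNat by omega]
  unfold wmax
  apply PySem.List.foldl_congr_mem
  intro acc x _
  rw [max_def]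

def rowOf (array : List Int) (w : Int) : List Int :=
  (PySem.List.pyRange 0 ((array.length : Int) - 1 - w) 1).map (fun j => wmax array w.toNat j.toNat)

lemma row0_eq (array : List Int) :
    List.replicate ((array.length : Int) - 1).toNat (0 : Int) = rowOf array 0 := by
  unfold rowOf
  have hw : ∀ j : Int, wmax array (0:Int).toNat j.toNat = 0 := fun _ => rfl
  simp only [hw]
  rw [List.map_const', PySem.List.length_pyRange_one]
  simp

lemma b_inv (array : List Int) (m : Nat) (hm : (m : Int) ≤ (array.length : Int) - 2) :
    (PySem.List.pyRange 1 (1 + (m : Int)) 1).foldl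
      (fun (st : List Int × List Int) w =>
        let row' := (PySem.List.pyRange 0 ((array.length : Int) - 1 - w) 1).map (fun j =>
          max (PySem.List.pyGetD st.2 j 0) (PySem.List.pyGetD array (j + w - 1) 0))
        (st.1 ++ row', row'))
      (List.replicate ((array.length : Int) - 1).toNat (PySem.List.pyGetD array 0 0), rowOf array 0)
    = (List.replicate ((array.length : Int) - 1).toNat (PySem.List.pyGetD array 0 0)
        ++ (PySem.List.pyRange 1 (1 + (m : Int)) 1).flatMap (rowOf array), rowOf array m) := by
  induction m with
  | zero =>
      rw [PySem.List.pyRange_one_eq_nil (by omega)]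
      simp
  | succ m ih =>
      have hm' : (m : Int) ≤ (array.length : Int) - 2 := by push_cast at hm ⊢; omega
      have hc : (1 + (m : Int)) = ((m+1 : Nat) : Int) := by push_cast; ring
      have hsplit : PySem.List.pyRange 1 (1 + ((m+1 : Nat) : Int)) 1
          = PySem.List.pyRange 1 (1 + (m : Int)) 1 ++ [1 + (m : Int)] := by
        rw [show (1 + ((m+1 : Nat) : Int)) = (1 + (m : Int)) + 1 by push_cast; ring]
        exact PySem.List.pyRange_one_succ_right (by omega)
      rw [hsplit, List.foldl_append, ih hm', List.flatMap_append]
      simp only [List.foldl_cons, List.foldl_nil, List.flatMap_cons, List.flatMap_nil,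
        List.append_nil, List.append_assoc]
      have hrow : (PySem.List.pyRange 0 ((array.length : Int) - 1 - (1 + (m:Int))) 1).map (fun j =>
          max (PySem.List.pyGetD (rowOf array m) j 0) (PySem.List.pyGetD array (j + (1 + (m:Int)) - 1) 0))
          = rowOf array ((m+1 : Nat) : Int) := by
        unfold rowOf
        rw [show ((array.length : Int) - 1 - ((m+1:Nat):Int)) = (array.length : Int) - 1 - (1 + (m:Int)) by push_cast; ring]
        apply List.map_congr_left
        intro j hj
        rw [PySem.List.mem_pyRange_one] at hj
        rw [PySem.List.pyGetD_map_pyRange_of_nonneg (fun j => wmax array (m:Int).toNat j.toNat)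
          ((array.length : Int) - 1 - (m:Int)) j 0 hj.1 (by omega)]
        rw [show (j + (1 + (m:Int)) - 1) = j + (m:Int) by ring]
        rw [PySem.List.pyGetD_eq_getElem array 0 (by omega) (by omega)]
        have hg : array[(j + (m:Int)).toNat]'(by omega) = array.getD (j.toNat + m) 0 := by
          rw [List.getD_eq_getElem _ _ (by omega)]
          congr 1
          omega
        rw [hg, Int.toNat_natCast]
        rw [show ((m+1 : Nat) : Int).toNat = m + 1 by omega]
        exact (wmax_succ array m j.toNat (by omega)).symm
      rw [hrow, hc]

lemma a_flatMap (array : List Int) :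
    step_to_transform array =
      (PySem.List.pyRange 0 ((array.length : Int) - 1) 1).flatMap (fun i =>
        (PySem.List.pyRange 0 ((array.length : Int) - 1 - i) 1).map (fun j =>
          (PySem.List.slice array (some j) (some (i + j))).foldl
            (fun m x => if m ≤ x then x else m)
            (if i + j == j then PySem.List.pyGetD array 0 0 else 0))) := by
  unfold step_to_transform
  simp only [PySem.List.foldl_append_singleton_eq_map, PySem.List.foldl_append_eq_flatMap,
    List.nil_append]

lemma aval_zero (array : List Int) (j : Int) (hj : 0 ≤ j) :
    (PySem.List.slice array (some j) (some ((0:Int) + j))).foldl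
        (fun m x => if m ≤ x then x else m)
        (if (0:Int) + j == j then PySem.List.pyGetD array 0 0 else 0)
      = PySem.List.pyGetD array 0 0 := by
  rw [show (0:Int) + j = j by ring]
  rw [PySem.List.slice_toNat _ hj hj]
  simp

theorem ab_eq (array : List Int) : step_to_transform array = step_to_transform_alt array := by
  by_cases hn : (array.length : Int) < 2
  · rw [a_flatMap, PySem.List.pyRange_one_eq_nil (by omega)]
    simp [step_to_transform_alt, hn]
  · rw [not_lt] at hn
    have h2 : 2 ≤ array.length := by exact_mod_cast hn
    have hm : ((array.length - 2 : Nat) : Int) = (array.length : Int) - 2 := by omega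
    have hB : step_to_transform_alt array
        = List.replicate ((array.length : Int) - 1).toNat (PySem.List.pyGetD array 0 0)
          ++ (PySem.List.pyRange 1 (1 + ((array.length - 2 : Nat) : Int)) 1).flatMap (rowOf array) := by
      simp only [step_to_transform_alt]
      rw [if_neg (by omega), row0_eq]
      rw [show PySem.List.pyRange 1 ((array.length : Int) - 1) 1
            = PySem.List.pyRange 1 (1 + ((array.length - 2 : Nat) : Int)) 1 from by
        rw [show (array.length : Int) - 1 = 1 + ((array.length - 2 : Nat) : Int) by omega]]
      rw [b_inv array (array.length - 2) (by omega)]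
    rw [hB, a_flatMap]
    rw [PySem.List.pyRange_one_cons (a := 0) (b := (array.length : Int) - 1) (by omega)]
    rw [List.flatMap_cons]
    congr 1
    · -- the i = 0 chunk equals the replicate block
      rw [List.map_congr_left (fun j hj =>
        aval_zero array j ((PySem.List.mem_pyRange_one.mp hj).1))]
      rw [List.map_const', PySem.List.length_pyRange_one]
      congr 1
      omega
    · -- the i ≥ 1 chunks are exactly B's rows
      rw [show (0:Int) + 1 = 1 by ring,
        show 1 + ((array.length - 2 : Nat) : Int) = (array.length : Int) - 1 by omega]
      apply List.flatMap_congr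
      intro i hi
      rw [PySem.List.mem_pyRange_one] at hi
      unfold rowOf
      apply List.map_congr_left
      intro j hj
      rw [PySem.List.mem_pyRange_one] at hj
      have hne : (i + j == j) = false := by
        simp only [beq_eq_false_iff_ne, ne_eq]
        omega
      rw [hne]
      simp only [Bool.false_eq_true, if_false]
      exact aval_pos array i j hi.1 hj.1

-- ===== VERDICT (by name: the statement is the Claim_ definition above) =====
theorem step_to_transform_spec : Claim_equal_step_to_transform := by
  intro array _
  unfold Spec_step_to_transform
  exact ab_eq array
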